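-- pv_equiv track=rewrite | github.com/zsenarchitect/EA_Dist_Backup | Apps/lib/EnneadTab/FUTURE.py | categorize_scripts
-- ===== SOURCE A (Python) =====
-- def categorize_scripts(scripts):
--     """Categorize scripts by their type based on path.
--
--     Args:
--         scripts (dict): Dictionary of script paths and their line numbers
--
--     Returns:
--         dict: Dictionary of categorized scripts with line numbers
--     """
--     categories = {
--         'DarkSide': {},
--         'Rhino Apps': {},
--         'Revit Apps': {},
--         'Library Files': {}
--     }
--
--     for script, line_numbers in scripts.items():
--         if script.startswith('DarkSide/'):
--             categories['DarkSide'][script] = line_numbers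
--         elif '_rhino/' in script:
--             categories['Rhino Apps'][script] = line_numbers
--         elif '_revit/' in script:
--             categories['Revit Apps'][script] = line_numbers
--         else:
--             categories['Library Files'][script] = line_numbers
--
--     # Sort scripts within each category
--     for category in categories:
--         categories[category] = dict(sorted(categories[category].items()))
--
--     return categories
-- ===== SOURCE B (Python) =====
-- def _category(script):
--     if script.startswith('DarkSide/'):
--         return 'DarkSide'
--     if '_rhino/' in script:
--         return 'Rhino Apps'
--     if '_revit/' in script:
--         return 'Revit Apps'
--     return 'Library Files'
--
--
-- def categorize_scripts(scripts):
--     items = sorted(scripts.items())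
--     return {name: {s: v for s, v in items if _category(s) == name}
--             for name in ('DarkSide', 'Rhino Apps', 'Revit Apps', 'Library Files')}
-- ===== Notes on version B (the rewrite author's own statement) =====
-- stated objective: alternative
-- what changed: B replaces A's bucket-then-sort-each-bucket loop (mutating four dicts, then a per-category sort pass) with one global sort of the items followed by a pure classifier function and per-category filter comprehensions; no bucket is mutated and no per-bucket sort is needed.
import Mathlib
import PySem

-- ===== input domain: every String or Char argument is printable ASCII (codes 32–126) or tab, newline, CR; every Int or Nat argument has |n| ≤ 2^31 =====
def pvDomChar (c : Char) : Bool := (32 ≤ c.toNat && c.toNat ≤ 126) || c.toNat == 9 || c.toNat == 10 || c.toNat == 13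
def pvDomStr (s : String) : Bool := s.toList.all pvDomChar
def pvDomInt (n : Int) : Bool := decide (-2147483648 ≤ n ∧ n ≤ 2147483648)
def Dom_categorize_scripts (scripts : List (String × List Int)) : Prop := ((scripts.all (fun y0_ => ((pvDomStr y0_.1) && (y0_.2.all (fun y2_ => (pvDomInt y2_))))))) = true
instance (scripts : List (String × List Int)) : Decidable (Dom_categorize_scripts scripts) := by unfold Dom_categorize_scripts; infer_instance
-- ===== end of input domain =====

-- B restructures A: one global sort of the items plus a pure classifier and per-category
-- filters, instead of A's mutate-four-buckets loop followed by a per-bucket sort pass.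

-- ===== PORT A =====
-- Python sorts the (key, value) item tuples; the dict's keys are distinct (Pre_ below),
-- so the comparison never reaches the values and sorting by the key alone is exact.
def categorize_scripts (scripts : List (String × List Int)) : List (String × List (String × List Int)) :=
  let r := scripts.foldl
    (fun (c : PySem.Dict String (List Int) × PySem.Dict String (List Int) × PySem.Dict String (List Int) × PySem.Dict String (List Int)) kv =>
      if PySem.Str.startswith kv.1 "DarkSide/" then (c.1.insert kv.1 kv.2, c.2.1, c.2.2.1, c.2.2.2)
      else if PySem.Str.isIn "_rhino/" kv.1 then (c.1, c.2.1.insert kv.1 kv.2, c.2.2.1, c.2.2.2)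
      else if PySem.Str.isIn "_revit/" kv.1 then (c.1, c.2.1, c.2.2.1.insert kv.1 kv.2, c.2.2.2)
      else (c.1, c.2.1, c.2.2.1, c.2.2.2.insert kv.1 kv.2))
    (PySem.Dict.empty, PySem.Dict.empty, PySem.Dict.empty, PySem.Dict.empty)
  [("DarkSide", PySem.List.sorted r.1.items (fun p => p.1) false),
   ("Rhino Apps", PySem.List.sorted r.2.1.items (fun p => p.1) false),
   ("Revit Apps", PySem.List.sorted r.2.2.1.items (fun p => p.1) false),
   ("Library Files", PySem.List.sorted r.2.2.2.items (fun p => p.1) false)]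

-- ===== PORT B =====
def pvCategory (s : String) : String :=
  if PySem.Str.startswith s "DarkSide/" then "DarkSide"
  else if PySem.Str.isIn "_rhino/" s then "Rhino Apps"
  else if PySem.Str.isIn "_revit/" s then "Revit Apps"
  else "Library Files"

-- sorted(scripts.items()) also compares item tuples; keys distinct (Pre_), key-only sort is exact.
def categorize_scripts_alt (scripts : List (String × List Int)) : List (String × List (String × List Int)) :=
  let items := PySem.List.sorted scripts (fun p => p.1) false
  ["DarkSide", "Rhino Apps", "Revit Apps", "Library Files"].map
    (fun name => (name, (PySem.Dict.ofList (items.filter (fun p => pvCategory p.1 == name))).items))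

-- ===== PRECONDITION & SPEC =====
-- A's parameter is a Python dict; an association list with duplicate keys does not
-- represent one (a dict's items are key-distinct), so Pre_ admits exactly the lists
-- that are the items of a dict.
def Pre_categorize_scripts (scripts : List (String × List Int)) : Prop :=
  (scripts.map Prod.fst).Nodup
instance (scripts : List (String × List Int)) : Decidable (Pre_categorize_scripts scripts) := by unfold Pre_categorize_scripts; infer_instance

def pvWitness_categorize_scripts : (List (String × List Int)) :=
  [("DarkSide/a.py", [1]), ("foo_rhino/t.py", [2, 3]), ("x_revit/u.py", []), ("lib.py", [5])]

def Spec_categorize_scripts (scripts : List (String × List Int)) (out : List (String × List (String × List Int))) : Prop := out = categorize_scripts_alt scripts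
instance (scripts : List (String × List Int)) (out : List (String × List (String × List Int))) : Decidable (Spec_categorize_scripts scripts out) := by unfold Spec_categorize_scripts; infer_instance

-- ===== CLAIM (what is proved, stated in full; the proofs are below) =====
def Claim_equal_categorize_scripts : Prop := ∀ (scripts : List (String × List Int)), Dom_categorize_scripts scripts → Pre_categorize_scripts scripts → Spec_categorize_scripts scripts (categorize_scripts scripts)

-- ===== LEMMAS AND PROOFS =====

-- the four (mutually exclusive, exhaustive) branch tests of A, as Bool predicates on the key
def pvB1 (s : String) : Bool := PySem.Str.startswith s "DarkSide/"
def pvB2 (s : String) : Bool := !pvB1 s && PySem.Str.isIn "_rhino/" s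
def pvB3 (s : String) : Bool := !pvB1 s && !PySem.Str.isIn "_rhino/" s && PySem.Str.isIn "_revit/" s
def pvB4 (s : String) : Bool := !pvB1 s && !PySem.Str.isIn "_rhino/" s && !PySem.Str.isIn "_revit/" s

-- B's classifier agrees with A's branch tests, category by category
theorem pvCategory_eq_b1 (s : String) : (pvCategory s == "DarkSide") = pvB1 s := by
  simp only [pvCategory, pvB1]; split_ifs <;> simp_all
theorem pvCategory_eq_b2 (s : String) : (pvCategory s == "Rhino Apps") = pvB2 s := by
  simp only [pvCategory, pvB1, pvB2]; split_ifs <;> simp_all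
theorem pvCategory_eq_b3 (s : String) : (pvCategory s == "Revit Apps") = pvB3 s := by
  simp only [pvCategory, pvB1, pvB3]; split_ifs <;> simp_all
theorem pvCategory_eq_b4 (s : String) : (pvCategory s == "Library Files") = pvB4 s := by
  simp only [pvCategory, pvB1, pvB4]; split_ifs <;> simp_all

-- A's loop, decomposed: each bucket is an insert-fold over the matching filter
theorem pvFoldA (l : List (String × List Int))
    (d1 d2 d3 d4 : PySem.Dict String (List Int)) :
    l.foldl
      (fun (c : PySem.Dict String (List Int) × PySem.Dict String (List Int) × PySem.Dict String (List Int) × PySem.Dict String (List Int)) kv =>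
        if PySem.Str.startswith kv.1 "DarkSide/" then (c.1.insert kv.1 kv.2, c.2.1, c.2.2.1, c.2.2.2)
        else if PySem.Str.isIn "_rhino/" kv.1 then (c.1, c.2.1.insert kv.1 kv.2, c.2.2.1, c.2.2.2)
        else if PySem.Str.isIn "_revit/" kv.1 then (c.1, c.2.1, c.2.2.1.insert kv.1 kv.2, c.2.2.2)
        else (c.1, c.2.1, c.2.2.1, c.2.2.2.insert kv.1 kv.2))
      (d1, d2, d3, d4) =
    ((l.filter (fun p => pvB1 p.1)).foldl (fun d p => d.insert p.1 p.2) d1,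
     (l.filter (fun p => pvB2 p.1)).foldl (fun d p => d.insert p.1 p.2) d2,
     (l.filter (fun p => pvB3 p.1)).foldl (fun d p => d.insert p.1 p.2) d3,
     (l.filter (fun p => pvB4 p.1)).foldl (fun d p => d.insert p.1 p.2) d4) := by
  induction l generalizing d1 d2 d3 d4 with
  | nil => rfl
  | cons x t ih =>
      by_cases h1 : PySem.Str.startswith x.1 "DarkSide/" = true
      · simp only [List.foldl_cons, List.filter_cons, pvB1, pvB2, pvB3, pvB4, h1,
          Bool.not_true, Bool.false_and, Bool.false_eq_true, if_false, if_pos]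
        exact ih _ _ _ _
      · by_cases h2 : PySem.Str.isIn "_rhino/" x.1 = true
        · simp only [Bool.not_eq_true] at h1
          simp only [List.foldl_cons, List.filter_cons, pvB1, pvB2, pvB3, pvB4,
            h1, h2, Bool.not_false, Bool.true_and, Bool.false_eq_true, ite_false, ite_true]
          exact ih _ _ _ _
        · by_cases h3 : PySem.Str.isIn "_revit/" x.1 = true
          · simp only [Bool.not_eq_true] at h1 h2
            simp only [List.foldl_cons, List.filter_cons, pvB1, pvB2, pvB3, pvB4,
              h1, h2, h3, Bool.not_false, Bool.true_and, Bool.false_eq_true, ite_false, ite_true]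
            exact ih _ _ _ _
          · simp only [Bool.not_eq_true] at h1 h2 h3
            simp only [List.foldl_cons, List.filter_cons, pvB1, pvB2, pvB3, pvB4,
              h1, h2, h3, Bool.not_false, Bool.true_and, Bool.false_eq_true, ite_false, ite_true]
            exact ih _ _ _ _

-- an insert-fold over distinct fresh keys from empty IS the list
theorem pvItemsFold (l : List (String × List Int)) (h : (l.map Prod.fst).Nodup) :
    (l.foldl (fun d p => d.insert p.1 p.2) (PySem.Dict.empty : PySem.Dict String (List Int))).items = l := by
  have := PySem.Dict.items_foldl_insert_fresh (l := l) (k := Prod.fst) (v := Prod.snd)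
    (d := (PySem.Dict.empty : PySem.Dict String (List Int)))
    (by intro a _; simp [PySem.Dict.contains_empty]) h
  simpa using this

theorem pvItemsOfList (l : List (String × List Int)) (h : (l.map Prod.fst).Nodup) :
    (PySem.Dict.ofList l).items = l := by
  rw [show (PySem.Dict.ofList l : PySem.Dict String (List Int))
      = l.foldl (fun d p => d.insert p.1 p.2) PySem.Dict.empty from rfl]
  exact pvItemsFold l h

theorem pvNodupFilter (l : List (String × List Int)) (q : String × List Int → Bool)
    (h : (l.map Prod.fst).Nodup) : ((l.filter q).map Prod.fst).Nodup :=
  h.sublist ((List.filter_sublist).map Prod.fst)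

-- sorting a filtered list = filtering the sorted list (keys distinct, stable sort)
theorem pvSortedFilter (l : List (String × List Int)) (q : String × List Int → Bool)
    (h : (l.map Prod.fst).Nodup) :
    PySem.List.sorted (l.filter q) (fun p => p.1) false
      = (PySem.List.sorted l (fun p => p.1) false).filter q := by
  apply PySem.List.sorted_eq_of_perm_of_pairwise_lt
  · exact ((PySem.List.sorted_perm l (fun p => p.1) false).filter q)
  · have hperm : ((PySem.List.sorted l (fun p => p.1) false).map Prod.fst).Perm (l.map Prod.fst) :=
      (PySem.List.sorted_perm l (fun p => p.1) false).map Prod.fst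
    have hnd : ((PySem.List.sorted l (fun p => p.1) false).map Prod.fst).Nodup := hperm.nodup_iff.mpr h
    have hne : (PySem.List.sorted l (fun p => p.1) false).Pairwise (fun a b => a.1 ≠ b.1) :=
      (List.pairwise_map.mp hnd)
    have hle : (PySem.List.sorted l (fun p => p.1) false).Pairwise (fun a b => a.1 ≤ b.1) :=
      PySem.List.sorted_pairwise l (fun p => p.1)
    have hlt : (PySem.List.sorted l (fun p => p.1) false).Pairwise (fun a b => a.1 < b.1) :=
      (hle.and hne).imp (fun h => lt_of_le_of_ne h.1 h.2)
    exact hlt.filter q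

-- one bucket of A equals the corresponding bucket of B
theorem pvComponent (scripts : List (String × List Int))
    (hpre : (scripts.map Prod.fst).Nodup) (name : String) (q : String → Bool)
    (hcat : ∀ s : String, (pvCategory s == name) = q s) :
    PySem.List.sorted
        ((scripts.filter (fun p => q p.1)).foldl (fun d p => d.insert p.1 p.2)
          (PySem.Dict.empty : PySem.Dict String (List Int))).items (fun p => p.1) false
      = (PySem.Dict.ofList ((PySem.List.sorted scripts (fun p => p.1) false).filter
          (fun p => pvCategory p.1 == name))).items := by
  have hs : ((PySem.List.sorted scripts (fun p => p.1) false).map Prod.fst).Nodup :=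
    (((PySem.List.sorted_perm scripts (fun p => p.1) false).map Prod.fst).nodup_iff).mpr hpre
  have hq : (fun p : String × List Int => pvCategory p.1 == name) = (fun p => q p.1) := by
    funext p; exact hcat p.1
  rw [pvItemsFold _ (pvNodupFilter _ _ hpre), pvSortedFilter _ _ hpre, hq,
      pvItemsOfList _ (pvNodupFilter _ _ hs)]

-- ===== VERDICT (by name: the statement is the Claim_ definition above) =====
theorem categorize_scripts_spec : Claim_equal_categorize_scripts := by
  intro scripts _ hpre
  unfold Spec_categorize_scripts categorize_scripts categorize_scripts_alt
  simp only [pvFoldA, List.map_cons, List.map_nil]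
  rw [pvComponent scripts hpre "DarkSide" pvB1 pvCategory_eq_b1,
      pvComponent scripts hpre "Rhino Apps" pvB2 pvCategory_eq_b2,
      pvComponent scripts hpre "Revit Apps" pvB3 pvCategory_eq_b3,
      pvComponent scripts hpre "Library Files" pvB4 pvCategory_eq_b4]
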